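-- pv_equiv track=rewrite | github.com/nickjoven/harmonics | sync_cost/derivations/staircase_geometry.py | cf_depth
-- ===== SOURCE A (Python) =====
-- def cf_depth(p, q):
--     """Continued fraction depth = sum of partial quotients."""
--     if q == 0:
--         return 0
--     total = 0
--     while q > 0:
--         total += p // q
--         p, q = q, p % q
--     return total
-- ===== SOURCE B (Python) =====
-- def cf_depth(p, q):
--     """Continued fraction depth = sum of partial quotients (recursive Euclid)."""
--     if q <= 0:
--         return 0
--     return p // q + cf_depth(q, p % q)
-- ===== Notes on version B (the rewrite author's own statement) =====
-- stated objective: simpler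
-- what changed: Replaced the accumulator while-loop with a plain recursion over the Euclidean descent (base case q <= 0, else p//q + cf_depth(q, p%q)), no mutable state.
import Mathlib
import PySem

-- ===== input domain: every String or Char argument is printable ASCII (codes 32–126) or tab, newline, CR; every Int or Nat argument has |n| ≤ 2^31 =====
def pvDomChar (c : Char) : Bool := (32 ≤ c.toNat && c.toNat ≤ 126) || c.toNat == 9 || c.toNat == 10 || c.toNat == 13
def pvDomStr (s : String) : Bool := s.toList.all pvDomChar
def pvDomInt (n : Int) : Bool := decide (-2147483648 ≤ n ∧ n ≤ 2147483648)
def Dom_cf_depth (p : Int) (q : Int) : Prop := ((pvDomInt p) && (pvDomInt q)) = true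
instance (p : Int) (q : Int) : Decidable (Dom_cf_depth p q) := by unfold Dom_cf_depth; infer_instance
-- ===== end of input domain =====

-- B replaces A's accumulator while-loop by a plain recursion over the Euclidean descent (simpler decomposition, same cost).


-- ===== PORT A =====
-- while q > 0: total += p // q; p, q = q, p % q   — structural recursion on q.toNat (q strictly decreases while positive)
def cfLoopA (total p q : Int) : Int :=
  if h : q > 0 then
    cfLoopA (total + PySem.Int.floordiv p q) q (PySem.Int.mod p q)
  else total
termination_by q.toNat
decreasing_by
  have h1 := PySem.Int.mod_nonneg p (b := q) h
  have h2 := PySem.Int.mod_lt p (b := q) h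
  omega

def cf_depth (p : Int) (q : Int) : Int :=
  if q = 0 then 0
  else cfLoopA 0 p q

-- ===== PORT B =====
def cf_depth_alt (p : Int) (q : Int) : Int :=
  if h : q ≤ 0 then 0
  else PySem.Int.floordiv p q + cf_depth_alt q (PySem.Int.mod p q)
termination_by q.toNat
decreasing_by
  have h1 := PySem.Int.mod_nonneg p (b := q) (by omega)
  have h2 := PySem.Int.mod_lt p (b := q) (by omega)
  omega

-- ===== PRECONDITION & SPEC =====
def Spec_cf_depth (p : Int) (q : Int) (out : Int) : Prop := out = cf_depth_alt p q
instance (p : Int) (q : Int) (out : Int) : Decidable (Spec_cf_depth p q out) := by unfold Spec_cf_depth; infer_instance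

-- ===== CLAIM (what is proved, stated in full; the proofs are below) =====
def Claim_equal_cf_depth : Prop := ∀ (p : Int) (q : Int), Dom_cf_depth p q → Spec_cf_depth p q (cf_depth p q)

-- ===== LEMMAS AND PROOFS =====
-- Loop invariant: the accumulator adds up; the loop body from state (total, p, q) computes total + (B's recursion on (p, q)).
theorem cfLoopA_eq (total p q : Int) : cfLoopA total p q = total + cf_depth_alt p q := by
  by_cases h : q > 0
  · have h1 := PySem.Int.mod_nonneg p (b := q) h
    have h2 := PySem.Int.mod_lt p (b := q) h
    rw [cfLoopA, cf_depth_alt]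
    simp only [h, dif_pos, dif_neg (by omega : ¬ q ≤ 0)]
    have := cfLoopA_eq (total + PySem.Int.floordiv p q) q (PySem.Int.mod p q)
    rw [this]; ring
  · rw [cfLoopA, cf_depth_alt]
    simp only [dif_neg h, dif_pos (by omega : q ≤ 0)]
    ring
termination_by q.toNat
decreasing_by
  have h1 := PySem.Int.mod_nonneg p (b := q) h
  have h2 := PySem.Int.mod_lt p (b := q) h
  omega

-- ===== VERDICT (by name: the statement is the Claim_ definition above) =====
theorem cf_depth_spec : Claim_equal_cf_depth := by
  intro p q _
  unfold Spec_cf_depth cf_depth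
  by_cases h : q = 0
  · simp only [h, if_pos rfl]
    rw [cf_depth_alt]; simp
  · rw [if_neg h, cfLoopA_eq, zero_add]
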